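-- pv_equiv track=rewrite | github.com/marianafcl/IA_Proj | projeto 1/proj.py | count_colors
-- ===== SOURCE A (Python) =====
-- def count_colors(board):
--     colors = []
--     count = 0
--     for line in board:
--         for el in line:
--             if el not in colors:
--                 colors += [el]
--                 count += 1
--     return count
-- ===== SOURCE B (Python) =====
-- def count_colors(board):
--     flat = sorted(el for line in board for el in line)
--     count = 0
--     prev = None
--     for el in flat:
--         if prev is None or el != prev:
--             count += 1
--         prev = el
--     return count
-- ===== Notes on version B (the rewrite author's own statement) =====
-- stated objective: faster
-- what changed: Replaces A's seen-list membership tracking (a linear inner scan per element) by a sort-then-scan: flatten the board, sort it so duplicates become adjacent, and count in one pass the elements that differ from their predecessor.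
import Mathlib
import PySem

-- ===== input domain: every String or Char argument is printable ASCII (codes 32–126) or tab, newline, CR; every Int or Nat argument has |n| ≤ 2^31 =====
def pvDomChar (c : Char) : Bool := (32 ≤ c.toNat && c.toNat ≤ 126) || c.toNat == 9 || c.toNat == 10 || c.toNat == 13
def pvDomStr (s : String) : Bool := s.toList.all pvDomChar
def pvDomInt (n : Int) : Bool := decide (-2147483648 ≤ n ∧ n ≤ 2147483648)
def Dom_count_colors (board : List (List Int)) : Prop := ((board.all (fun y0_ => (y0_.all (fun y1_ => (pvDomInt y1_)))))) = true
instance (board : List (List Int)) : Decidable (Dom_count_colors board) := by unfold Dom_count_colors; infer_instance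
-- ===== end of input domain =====

-- B replaces A's seen-list membership tracking by a sort-then-adjacency-scan:
-- flatten, sort, count elements that differ from their predecessor (alternative algorithm).


-- ===== PORT A =====
-- A: nested loops maintaining a seen-list and a counter
def count_colors (board : List (List Int)) : Int :=
  (board.foldl
    (fun st line =>
      line.foldl
        (fun (st : List Int × Int) el =>
          if st.1.contains el then st else (st.1 ++ [el], st.2 + 1))
        st)
    ([], 0)).2

-- ===== PORT B =====
-- B: flatten, sort, one scan counting elements that differ from the previous one
def count_colors_alt (board : List (List Int)) : Int :=
  let flat := PySem.List.sorted (board.flatMap (fun line => line)) (fun x => x) false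
  (flat.foldl
    (fun (st : Option Int × Int) el =>
      (some el, if st.1 = some el then st.2 else st.2 + 1))
    (none, 0)).2

-- ===== PRECONDITION & SPEC =====
def Spec_count_colors (board : List (List Int)) (out : Int) : Prop := out = count_colors_alt board
instance (board : List (List Int)) (out : Int) : Decidable (Spec_count_colors board out) := by unfold Spec_count_colors; infer_instance

-- ===== CLAIM (what is proved, stated in full; the proofs are below) =====
def Claim_equal_count_colors : Prop := ∀ (board : List (List Int)), Dom_count_colors board → Spec_count_colors board (count_colors board)

-- ===== LEMMAS AND PROOFS =====

-- A's inner loop is Set.add threaded with the running length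
theorem inner_loop (l s : List Int) :
    l.foldl
      (fun (st : List Int × Int) el =>
        if st.1.contains el then st else (st.1 ++ [el], st.2 + 1))
      (s, (s.length : Int))
      = (l.foldl PySem.Set.add s, ((l.foldl PySem.Set.add s).length : Int)) := by
  induction l generalizing s with
  | nil => rfl
  | cons a t ih =>
      simp only [List.foldl_cons, PySem.Set.add, PySem.Set.contains]
      by_cases h : s.contains a = true
      · rw [if_pos h, if_pos h]; exact ih s
      · rw [if_neg h, if_neg h]
        have hlen : ((s ++ [a]).length : Int) = (s.length : Int) + 1 := by simp
        simpa [hlen] using ih (s ++ [a])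

theorem outer_loop (b : List (List Int)) (s : List Int) :
    b.foldl
      (fun st line =>
        line.foldl
          (fun (st : List Int × Int) el =>
            if st.1.contains el then st else (st.1 ++ [el], st.2 + 1))
          st)
      (s, (s.length : Int))
      = ((b.flatMap (fun line => line)).foldl PySem.Set.add s,
         (((b.flatMap (fun line => line)).foldl PySem.Set.add s).length : Int)) := by
  induction b generalizing s with
  | nil => rfl
  | cons l t ih =>
      simp only [List.foldl_cons, inner_loop, List.flatMap_cons, List.foldl_append]
      exact ih _

-- A's count is the number of distinct elements of the flattened board
theorem countA_eq_card (b : List (List Int)) :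
    count_colors b = (((b.flatMap (fun line => line)).toFinset.card : Int)) := by
  unfold count_colors
  have h := outer_loop b []
  simp only [List.length_nil, Nat.cast_zero] at h
  rw [h]
  have hof : (b.flatMap (fun line => line)).foldl PySem.Set.add []
      = PySem.Set.ofList (b.flatMap (fun line => line)) :=
    (PySem.Set.ofList_eq_foldl _).symm
  rw [hof]
  show ((PySem.Set.ofList (b.flatMap (fun line => line))).length : Int) = _
  congr 1
  have hnd := PySem.Set.nodup_ofList (xs := b.flatMap (fun line => line))
  have hfs : (PySem.Set.ofList (b.flatMap (fun line => line))).toFinset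
      = (b.flatMap (fun line => line)).toFinset := by
    apply Finset.ext
    intro x
    simp [List.mem_toFinset, PySem.Set.mem_ofList]
  rw [← hfs]
  exact (List.toFinset_card_of_nodup hnd).symm

-- B's scan, started with previous element p that is ≤ everything remaining,
-- adds the number of distinct values other than p
theorem scan_some (l : List Int) (h : l.Pairwise (· ≤ ·)) (p : Int)
    (hp : ∀ x ∈ l, p ≤ x) (c : Int) :
    (l.foldl
      (fun (st : Option Int × Int) el =>
        (some el, if st.1 = some el then st.2 else st.2 + 1))
      (some p, c)).2 = c + ((l.toFinset.erase p).card : Int) := by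
  induction l generalizing p c with
  | nil => simp
  | cons a t ih =>
      have hpr : t.Pairwise (· ≤ ·) := (List.pairwise_cons.mp h).2
      have hale : ∀ x ∈ t, a ≤ x := (List.pairwise_cons.mp h).1
      simp only [List.foldl_cons]
      by_cases hpa : p = a
      · subst hpa
        rw [if_pos rfl, ih hpr p hale c]
        congr 2
        simp [List.toFinset_cons, Finset.erase_insert_eq_erase]
      · have hne : (some p : Option Int) ≠ some a := by simpa using hpa
        rw [if_neg hne, ih hpr a hale (c + 1)]
        have hpnot : p ∉ (a :: t).toFinset := by
          simp only [List.toFinset_cons, Finset.mem_insert, List.mem_toFinset]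
          rintro (h1 | h2)
          · exact hpa h1
          · exact hpa (le_antisymm (hp a List.mem_cons_self) (hale p h2))
        rw [Finset.erase_eq_of_notMem hpnot]
        have hmem : a ∈ (a :: t).toFinset := by simp
        have hcard := Finset.card_erase_add_one hmem
        have herase : ((a :: t).toFinset).erase a = t.toFinset.erase a := by
          simp [List.toFinset_cons, Finset.erase_insert_eq_erase]
        rw [herase] at hcard
        omega

-- B's scan from the initial state counts the distinct elements
theorem scan_none (l : List Int) (h : l.Pairwise (· ≤ ·)) :
    (l.foldl
      (fun (st : Option Int × Int) el =>
        (some el, if st.1 = some el then st.2 else st.2 + 1))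
      ((none : Option Int), (0 : Int))).2 = (l.toFinset.card : Int) := by
  cases l with
  | nil => simp
  | cons a t =>
      have hpr : t.Pairwise (· ≤ ·) := (List.pairwise_cons.mp h).2
      have hale : ∀ x ∈ t, a ≤ x := (List.pairwise_cons.mp h).1
      simp only [List.foldl_cons, reduceCtorEq, if_false]
      norm_num
      rw [scan_some t hpr a hale 1]
      have hmem : a ∈ (a :: t).toFinset := by simp
      have hcard := Finset.card_erase_add_one hmem
      have herase : ((a :: t).toFinset).erase a = t.toFinset.erase a := by
        simp [List.toFinset_cons, Finset.erase_insert_eq_erase]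
      rw [herase] at hcard
      simp only [List.toFinset_cons] at hcard ⊢
      omega

-- ===== VERDICT (by name: the statement is the Claim_ definition above) =====
theorem count_colors_spec : Claim_equal_count_colors := by
  intro board _
  unfold Spec_count_colors count_colors_alt
  set flat := board.flatMap (fun line => line) with hflat
  have hsfs : (PySem.List.sorted flat (fun x => x) false).toFinset = flat.toFinset := by
    apply Finset.ext
    intro x
    simp [List.mem_toFinset, PySem.List.mem_sorted]
  have hpw : (PySem.List.sorted flat (fun x => x) false).Pairwise (· ≤ ·) := by
    simpa using PySem.List.sorted_pairwise (xs := flat) (key := fun x => x)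
  rw [countA_eq_card, scan_none _ hpw, hsfs]
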